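-- pv_equiv track=rewrite | github.com/ArnoldFrb/Perceptron-rampa | Funtions.py | FuncionSoma
-- ===== SOURCE A (Python) =====
-- def FuncionSoma(entradas, pesos, umbrales):
--     salidaSoma = []
--     for i in range(len(pesos[0])):
--         sumatoria = 0
--         for j in range(len(pesos)):
--             sumatoria += entradas[j] * pesos[j][i]
--         salidaSoma.append(sumatoria - umbrales[i])
--     return salidaSoma
-- ===== SOURCE B (Python) =====
-- def FuncionSoma(entradas, pesos, umbrales):
--     acc = [0] * len(pesos[0])
--     for e, fila in zip(entradas, pesos):
--         acc = [a + e * w for a, w in zip(acc, fila)]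
--     return [a - u for a, u in zip(acc, umbrales)]
-- ===== Notes on version B (the rewrite author's own statement) =====
-- stated objective: simpler
-- what changed: B interchanges the loops: instead of A's column-major nested index loops recomputing each column sum from scratch, B keeps one accumulator vector and folds over rows with zip-based comprehensions, with no index arithmetic; umbrales are subtracted once at the end.
import Mathlib
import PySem

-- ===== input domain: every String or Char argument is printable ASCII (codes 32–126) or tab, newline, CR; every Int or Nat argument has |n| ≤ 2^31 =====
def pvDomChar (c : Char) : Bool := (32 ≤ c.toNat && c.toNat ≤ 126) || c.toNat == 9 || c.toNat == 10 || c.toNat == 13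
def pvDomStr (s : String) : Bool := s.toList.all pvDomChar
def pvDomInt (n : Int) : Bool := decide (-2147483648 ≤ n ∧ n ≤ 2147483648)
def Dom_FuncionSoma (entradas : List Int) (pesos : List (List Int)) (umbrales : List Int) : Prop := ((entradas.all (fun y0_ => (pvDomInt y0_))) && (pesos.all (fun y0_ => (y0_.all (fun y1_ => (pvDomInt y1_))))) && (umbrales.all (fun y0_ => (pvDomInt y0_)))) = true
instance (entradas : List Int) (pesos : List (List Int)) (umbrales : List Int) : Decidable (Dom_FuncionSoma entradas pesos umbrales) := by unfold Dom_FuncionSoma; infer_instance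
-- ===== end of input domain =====

-- ===== PORT A =====
-- B changes the decomposition: a row-major zip-based accumulator instead of A's column-major nested index loops (objective: simpler).
def FuncionSoma (entradas : List Int) (pesos : List (List Int)) (umbrales : List Int) : List Int :=
  (PySem.List.pyRange 0 ((pesos.headD []).length : Int) 1).foldl
    (fun salidaSoma i =>
      salidaSoma ++
        [((PySem.List.pyRange 0 (pesos.length : Int) 1).foldl
            (fun sumatoria j =>
              sumatoria +
                PySem.List.pyGetD entradas j 0 *
                  PySem.List.pyGetD (PySem.List.pyGetD pesos j []) i 0) 0)
          - PySem.List.pyGetD umbrales i 0]) []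

-- ===== PORT B =====
def FuncionSoma_alt (entradas : List Int) (pesos : List (List Int)) (umbrales : List Int) : List Int :=
  let acc : List Int :=
    (entradas.zip pesos).foldl
      (fun acc ef => (acc.zip ef.2).map (fun aw => aw.1 + ef.1 * aw.2))
      (List.replicate (pesos.headD []).length 0)
  (acc.zip umbrales).map (fun au => au.1 - au.2)

-- ===== PRECONDITION & SPEC =====
-- Pre_ = exactly the inputs on which A raises no IndexError: pesos nonempty, every row and umbrales
-- at least as long as pesos[0], and (when pesos[0] is nonempty) entradas at least as long as pesos.
def Pre_FuncionSoma (entradas : List Int) (pesos : List (List Int)) (umbrales : List Int) : Prop :=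
  pesos ≠ [] ∧ (pesos.headD []).length ≤ umbrales.length ∧
    (∀ r ∈ pesos, (pesos.headD []).length ≤ r.length) ∧
    ((pesos.headD []).length = 0 ∨ pesos.length ≤ entradas.length)
instance (entradas : List Int) (pesos : List (List Int)) (umbrales : List Int) : Decidable (Pre_FuncionSoma entradas pesos umbrales) := by unfold Pre_FuncionSoma; infer_instance

def pvWitness_FuncionSoma : List Int × List (List Int) × List Int :=
  ([2, -1], [[3, 4], [5, 6]], [1, 0])

def Spec_FuncionSoma (entradas : List Int) (pesos : List (List Int)) (umbrales : List Int) (out : List Int) : Prop := out = FuncionSoma_alt entradas pesos umbrales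
instance (entradas : List Int) (pesos : List (List Int)) (umbrales : List Int) (out : List Int) : Decidable (Spec_FuncionSoma entradas pesos umbrales out) := by unfold Spec_FuncionSoma; infer_instance

-- ===== CLAIM (what is proved, stated in full; the proofs are below) =====
def Claim_equal_FuncionSoma : Prop := ∀ (entradas : List Int) (pesos : List (List Int)) (umbrales : List Int), Dom_FuncionSoma entradas pesos umbrales → Pre_FuncionSoma entradas pesos umbrales → Spec_FuncionSoma entradas pesos umbrales (FuncionSoma entradas pesos umbrales)

-- ===== LEMMAS AND PROOFS =====

-- the per-column sum both programs compute, as a zip over (entradas, pesos)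
def pvColSum (e : List Int) (rows : List (List Int)) (i : Nat) : Int :=
  ((e.zip rows).map (fun er => er.1 * er.2.getD i 0)).sum

-- A's index-driven inner sum equals the zip form when entradas is long enough
lemma pv_indexSum_eq_colSum (rows : List (List Int)) (e : List Int) (i : Nat)
    (he : rows.length ≤ e.length) :
    ((List.range rows.length).map (fun j => e.getD j 0 * ((rows.getD j []).getD i 0))).sum
      = pvColSum e rows i := by
  induction rows generalizing e with
  | nil => simp [pvColSum]
  | cons r rs ih =>
    cases e with
    | nil => simp at he
    | cons x xs =>
      simp only [List.length_cons, List.range_succ_eq_map, List.map_cons, List.map_map,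
        List.sum_cons, pvColSum, List.zip_cons_cons]
      simp only [List.getD_cons_zero]
      have := ih xs (by simpa using he)
      simp only [pvColSum] at this
      simp only [Function.comp_def, List.getD, List.getElem?_cons_succ]
      simp only [List.getD] at this
      rw [this]

-- B's loop, elementwise: starting from acc it adds the column sums of the rows processed
lemma pv_loop_eq (rows : List (List Int)) (e : List Int) (acc : List Int)
    (hr : ∀ r ∈ rows, acc.length ≤ r.length) :
    (e.zip rows).foldl (fun acc ef => (acc.zip ef.2).map (fun aw => aw.1 + ef.1 * aw.2)) acc
      = (List.range acc.length).map (fun i => acc.getD i 0 + pvColSum e rows i) := by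
  induction rows generalizing e acc with
  | nil =>
    simp [pvColSum]
    exact (List.ext_getElem (by simp) (by intro i h1 h2; simp [List.getElem?_eq_getElem h1]))
  | cons r rs ih =>
    cases e with
    | nil =>
      simp [pvColSum]
      exact (List.ext_getElem (by simp) (by intro i h1 h2; simp [List.getElem?_eq_getElem h1]))
    | cons x xs =>
      have hlen : acc.length ≤ r.length := hr r (by simp)
      have hacc' : ((acc.zip r).map (fun aw => aw.1 + x * aw.2)).length = acc.length := by
        simp [Nat.min_eq_left hlen]
      simp only [List.zip_cons_cons, List.foldl_cons]
      rw [ih xs _ (by intro r' hr'; rw [hacc']; exact hr r' (by simp [hr']))]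
      rw [hacc']
      apply List.map_congr_left
      intro i hi
      have hi' : i < acc.length := List.mem_range.mp hi
      have hi2 : i < (acc.zip r).length := by simp [Nat.min_eq_left hlen]; exact hi'
      simp only [pvColSum, List.zip_cons_cons, List.map_cons, List.sum_cons]
      rw [List.getD_eq_getElem _ _ (by simpa [hacc'] using hi'), List.getElem_map,
        List.getElem_zip, List.getD_eq_getElem _ _ hi',
        List.getD_eq_getElem _ _ (Nat.lt_of_lt_of_le hi' hlen)]
      ring

-- folding zip-subtraction into a map over range
lemma pv_zip_sub (a u : List Int) (hu : a.length ≤ u.length) :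
    (a.zip u).map (fun au => au.1 - au.2)
      = (List.range a.length).map (fun i => a.getD i 0 - u.getD i 0) := by
  induction a generalizing u with
  | nil => simp
  | cons x xs ih =>
    cases u with
    | nil => simp at hu
    | cons y ys =>
      simp only [List.zip_cons_cons, List.map_cons, List.length_cons,
        List.range_succ_eq_map, List.map_map]
      simp [ih ys (by simpa using hu)]

-- ===== VERDICT (by name: the statement is the Claim_ definition above) =====
theorem FuncionSoma_spec : Claim_equal_FuncionSoma := by
  intro e p u _hDom hPre
  obtain ⟨hne, hu, hrows, hcase⟩ := hPre
  unfold Spec_FuncionSoma FuncionSoma FuncionSoma_alt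
  set n := (p.headD []).length with hn
  rw [PySem.List.foldl_append_singleton_eq_map
    (f := fun i => ((PySem.List.pyRange 0 (p.length : Int)).foldl
      (fun sumatoria j => sumatoria + PySem.List.pyGetD e j 0 *
        PySem.List.pyGetD (PySem.List.pyGetD p j []) i 0) 0) - PySem.List.pyGetD u i 0)]
  rw [PySem.List.pyRange_zero_natCast n, List.map_map, List.nil_append]
  have hloop := pv_loop_eq p e (List.replicate n 0) (by intro r hr; simpa using hrows r hr)
  simp only [List.length_replicate] at hloop
  rw [hloop]
  have hlenmap : ((List.range n).map (fun i => (List.replicate n (0:Int)).getD i 0 + pvColSum e p i)).length = n := by simp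
  rw [pv_zip_sub _ u (by rw [hlenmap]; exact hu)]
  rw [hlenmap]
  apply List.map_congr_left
  intro i hi
  have hi' : i < n := List.mem_range.mp hi
  simp only [Function.comp_def]
  rw [PySem.List.foldl_add (PySem.List.pyRange 0 (p.length:Int))
        (fun j => PySem.List.pyGetD e j 0 *
          PySem.List.pyGetD (PySem.List.pyGetD p j []) (i:Int) 0) 0]
  rw [PySem.List.pyRange_zero_natCast p.length, List.map_map]
  have he : p.length ≤ e.length := by
    rcases hcase with h0 | hle
    · omega
    · exact hle
  simp only [Function.comp_def, PySem.List.pyGetD_natCast, zero_add]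
  rw [pv_indexSum_eq_colSum p e i he]
  have hR : ((List.range n).map (fun i => (List.replicate n (0:Int)).getD i 0 + pvColSum e p i)).getD i 0
      = (List.replicate n (0:Int)).getD i 0 + pvColSum e p i := by
    rw [List.getD_eq_getElem _ _ (by simpa using hi')]
    simp
  rw [hR]
  simp
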